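-- pv_equiv track=rewrite | github.com/peteris-racinskis/homework | KMB_1/compute-mobius.py | compute_mobius_cubic
-- ===== SOURCE A (Python) =====
-- def compute_mobius_cubic(zeta, n):
--     incidence = transpose(zeta, n)
--     output = [[0] * n for _ in range(n)]
--     for i in range(n):
--         output[i][i] = 1
--     for i in range(n): # every row
--         for j in range(i): # columns up to diagonal
--             for k in range(i): # all rows above (down to current)
--                 # ij - current row, column
--                 # kj - other row (above), current column
--                 # ik - current row (as row), other row (as column) in incidence matrix
--                 output[i][j] = output[i][j] - (output[k][j] if incidence[i][k] == 1 else 0)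
--     return transpose(output, n)
--
-- def transpose(array, n):
--     return [[array[j][i] for j in range(n)] for i in range(n)]
-- ===== SOURCE B (Python) =====
-- def compute_mobius_cubic(zeta, n):
--     # Neumann series: the answer is the inverse of the unipotent matrix I + N,
--     # where N is the strict 0/1 pattern N[k][b] = 1 iff k < b and zeta[k][b] == 1.
--     # Since N is strictly triangular (nilpotent), the inverse is the finite
--     # alternating sum I - N + N^2 - ... computed by repeated matrix multiplication.
--     N = [[1 if k < b and zeta[k][b] == 1 else 0 for b in range(n)] for k in range(n)]
--     result = [[1 if a == b else 0 for b in range(n)] for a in range(n)]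
--     term = [row[:] for row in result]
--     for _ in range(n - 1):
--         term = [[-sum(term[a][k] * N[k][b] for k in range(n)) for b in range(n)]
--                 for a in range(n)]
--         result = [[result[a][b] + term[a][b] for b in range(n)] for a in range(n)]
--     return result
-- ===== Notes on version B (the rewrite author's own statement) =====
-- stated objective: alternative
-- what changed: Replaces the in-place triangular forward-substitution triple loop (with its two transposes) by the Neumann series: B extracts the strict 0/1 pattern N of zeta and computes the answer as the alternating sum I - N + N^2 - ... of matrix powers, built by repeated matrix multiplication.
import Mathlib
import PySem

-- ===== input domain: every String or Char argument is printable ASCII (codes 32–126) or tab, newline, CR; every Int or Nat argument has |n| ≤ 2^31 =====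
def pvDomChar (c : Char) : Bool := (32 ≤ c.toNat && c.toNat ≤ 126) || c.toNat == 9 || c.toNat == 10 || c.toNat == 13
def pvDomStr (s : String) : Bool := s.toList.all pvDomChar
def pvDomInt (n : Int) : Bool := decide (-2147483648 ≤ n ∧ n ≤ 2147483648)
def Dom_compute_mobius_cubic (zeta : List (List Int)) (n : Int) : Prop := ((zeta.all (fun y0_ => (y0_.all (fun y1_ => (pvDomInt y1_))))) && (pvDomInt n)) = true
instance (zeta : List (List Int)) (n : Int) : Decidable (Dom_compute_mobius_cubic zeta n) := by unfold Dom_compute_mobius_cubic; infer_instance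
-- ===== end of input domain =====

-- B replaces A's in-place triangular forward substitution (with its two transposes) by a
-- different algorithm: the Neumann series I - N + N^2 - … of the strict 0/1 pattern N of
-- zeta, built by repeated matrix multiplication (objective: alternative; O(n^4) vs O(n^3)).

-- ===== PORT A =====
-- transpose(array, n): indices produced by range are nonnegative and, under
-- Pre_, in range, so pyGetD with a default is exact there.
def pvTranspose (array : List (List Int)) (n : Int) : List (List Int) :=
  (PySem.List.pyRange 0 n 1).map (fun i =>
    (PySem.List.pyRange 0 n 1).map (fun j =>
      PySem.List.pyGetD (PySem.List.pyGetD array j []) i 0))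

-- literal port of A: incidence = transpose(zeta, n); identity-initialised output;
-- triple loop mutating output[i][j]; final transpose.  '[0]*n' is
-- List.replicate n.toNat 0; 'output[i][j] = v' is pySetD (indices from range are
-- nonnegative and in range by construction, so the total forms are exact).
-- the innermost statement 'output[i][j] = output[i][j] - (output[k][j] if incidence[i][k] == 1 else 0)'
def pvAInner (incidence : List (List Int)) (i j : Int) (out : List (List Int)) (k : Int) : List (List Int) :=
  PySem.List.pySetD out i (PySem.List.pySetD (PySem.List.pyGetD out i []) j
    (PySem.List.pyGetD (PySem.List.pyGetD out i []) j 0 -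
      (if PySem.List.pyGetD (PySem.List.pyGetD incidence i []) k 0 == 1
       then PySem.List.pyGetD (PySem.List.pyGetD out k []) j 0 else 0)))

-- 'for k in range(i): ...'
def pvAMiddle (incidence : List (List Int)) (i : Int) (out : List (List Int)) (j : Int) : List (List Int) :=
  (PySem.List.pyRange 0 i 1).foldl (pvAInner incidence i j) out

-- 'for j in range(i): for k in range(i): ...'
def pvAOuter (incidence : List (List Int)) (out : List (List Int)) (i : Int) : List (List Int) :=
  (PySem.List.pyRange 0 i 1).foldl (pvAMiddle incidence i) out

-- 'output[i][i] = 1'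
def pvADiag (out : List (List Int)) (i : Int) : List (List Int) :=
  PySem.List.pySetD out i (PySem.List.pySetD (PySem.List.pyGetD out i []) i 1)

def compute_mobius_cubic (zeta : List (List Int)) (n : Int) : List (List Int) :=
  let incidence := pvTranspose zeta n
  let output0 := (PySem.List.pyRange 0 n 1).map (fun _ => List.replicate n.toNat (0 : Int))
  let output1 := (PySem.List.pyRange 0 n 1).foldl pvADiag output0
  let output2 := (PySem.List.pyRange 0 n 1).foldl (pvAOuter incidence) output1
  pvTranspose output2 n

-- ===== PORT B =====
-- literal port of Source B (Neumann series): N is the strict 0/1 pattern of zeta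
-- ('1 if k < b and zeta[k][b] == 1 else 0', the short-circuit 'and' becoming a
-- nested if); result and term start as the identity; each of the n-1 loop
-- iterations multiplies term by -N (a triple comprehension with an inner sum)
-- and adds it to result.  Indexing inside comprehensions is in range, so pyGetD
-- with a default is exact.
-- N = [[1 if k < b and zeta[k][b] == 1 else 0 for b in range(n)] for k in range(n)]
-- (the short-circuit 'and' becomes a nested if)
def pvBN (zeta : List (List Int)) (n : Int) : List (List Int) :=
  (PySem.List.pyRange 0 n 1).map (fun k =>
    (PySem.List.pyRange 0 n 1).map (fun b =>
      if k < b then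
        (if PySem.List.pyGetD (PySem.List.pyGetD zeta k []) b 0 == 1 then (1 : Int) else 0)
      else 0))

-- the identity matrix '[[1 if a == b else 0 for b in range(n)] for a in range(n)]'
def pvBId (n : Int) : List (List Int) :=
  (PySem.List.pyRange 0 n 1).map (fun a =>
    (PySem.List.pyRange 0 n 1).map (fun b => if a == b then (1 : Int) else 0))

-- one loop iteration: term = -(term @ N) (triple comprehension with an inner sum),
-- then result = result + term, entrywise
def pvBStep (N : List (List Int)) (n : Int) (st : List (List Int) × List (List Int)) :
    List (List Int) × List (List Int) :=
  let term := (PySem.List.pyRange 0 n 1).map (fun a =>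
    (PySem.List.pyRange 0 n 1).map (fun b =>
      -(((PySem.List.pyRange 0 n 1).map (fun k =>
          PySem.List.pyGetD (PySem.List.pyGetD st.2 a []) k 0 *
          PySem.List.pyGetD (PySem.List.pyGetD N k []) b 0)).sum)))
  let result := (PySem.List.pyRange 0 n 1).map (fun a =>
    (PySem.List.pyRange 0 n 1).map (fun b =>
      PySem.List.pyGetD (PySem.List.pyGetD st.1 a []) b 0 +
      PySem.List.pyGetD (PySem.List.pyGetD term a []) b 0))
  (result, term)

def compute_mobius_cubic_alt (zeta : List (List Int)) (n : Int) : List (List Int) :=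
  let N := pvBN zeta n
  let result0 := pvBId n
  let term0 := result0.map (fun row => row)   -- 'row[:]' copies the row: same value
  let st := (PySem.List.pyRange 0 (n - 1) 1).foldl (fun st _ => pvBStep N n st) (result0, term0)
  st.1

-- ===== PRECONDITION & SPEC =====
-- Pre_ excludes exactly the inputs on which the Python A raises IndexError:
-- transpose(zeta, n) reads zeta[j][i] for all i, j < n, so for positive n the
-- first n rows of zeta must exist and each have at least n entries.
def Pre_compute_mobius_cubic (zeta : List (List Int)) (n : Int) : Prop :=
  0 < n → (n ≤ (zeta.length : Int) ∧ ∀ r ∈ zeta.take n.toNat, n ≤ (r.length : Int))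
instance (zeta : List (List Int)) (n : Int) : Decidable (Pre_compute_mobius_cubic zeta n) := by
  unfold Pre_compute_mobius_cubic; infer_instance

def pvWitness_compute_mobius_cubic : List (List Int) × Int := ([[1, 1], [0, 1]], 2)

def Spec_compute_mobius_cubic (zeta : List (List Int)) (n : Int) (out : List (List Int)) : Prop := out = compute_mobius_cubic_alt zeta n
instance (zeta : List (List Int)) (n : Int) (out : List (List Int)) : Decidable (Spec_compute_mobius_cubic zeta n out) := by unfold Spec_compute_mobius_cubic; infer_instance

-- ===== CLAIM (what is proved, stated in full; the proofs are below) =====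
def Claim_equal_compute_mobius_cubic : Prop := ∀ (zeta : List (List Int)) (n : Int), Dom_compute_mobius_cubic zeta n → Pre_compute_mobius_cubic zeta n → Spec_compute_mobius_cubic zeta n (compute_mobius_cubic zeta n)

-- ===== LEMMAS AND PROOFS =====

-- the entry test 'zeta[k][b] == 1' as both ports read it (getD form)
def pvC (zeta : List (List Int)) (k b : ℕ) : Bool := ((zeta.getD k []).getD b 0) == 1

-- Kronecker delta
def pvDelta (a b : ℕ) : Int := if a = b then 1 else 0

-- the strict 0/1 pattern of zeta (B's matrix N), as a pure function
def pvN (c : ℕ → ℕ → Bool) (k b : ℕ) : Int := if k < b then (if c k b then 1 else 0) else 0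

-- an n×n matrix as a map of maps over ranges, with an entry generator
def pvMat (nn : ℕ) (g : ℕ → ℕ → Int) : List (List Int) :=
  (List.range nn).map (fun i => (List.range nn).map (fun j => g i j))

-- A's table: row i of the pre-transpose output, by the forward-substitution
-- recurrence (fuel = i makes the recursion structural)
def pvMgo (c : ℕ → ℕ → Bool) : ℕ → ℕ → ℕ → Int
  | 0, i, j => pvDelta i j
  | fuel + 1, i, j =>
      if i ≤ j then pvDelta i j
      else -(((List.range i).map (fun k => if c k i then pvMgo c fuel k j else 0)).sum)

def pvM (c : ℕ → ℕ → Bool) (i j : ℕ) : Int := pvMgo c i i j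

-- B's table: entry of (-N)^m (term after m iterations)
def pvT (c : ℕ → ℕ → Bool) (nn : ℕ) : ℕ → ℕ → ℕ → Int
  | 0, a, b => pvDelta a b
  | m + 1, a, b => -(((List.range nn).map (fun k => pvT c nn m a k * pvN c k b)).sum)

-- partial Neumann sum: result after t iterations
def pvS (c : ℕ → ℕ → Bool) (nn t a b : ℕ) : Int :=
  ((List.range (t + 1)).map (fun m => pvT c nn m a b)).sum

theorem pvRange_cast (n : Int) :
    PySem.List.pyRange 0 n 1 = (List.range n.toNat).map (fun k : ℕ => (k : Int)) := by
  rw [PySem.List.pyRange_one]; simp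

theorem pvSet_map_range {α : Type} (f : ℕ → α) (N i : ℕ) (hi : i < N) (v : α) :
    ((List.range N).map f).set i v = (List.range N).map (fun r => if r = i then v else f r) := by
  apply List.ext_getElem (by simp)
  intro m h1 h2
  simp only [List.length_set, List.length_map, List.length_range] at h1
  by_cases hm : m = i
  · subst hm; rw [List.getElem_set_self]; simp
  · rw [List.getElem_set_ne (by omega)]; simp [hm]

theorem pvMat_getD (nn : ℕ) (g : ℕ → ℕ → Int) (i j : ℕ) (hi : i < nn) (hj : j < nn) :
    PySem.List.pyGetD (PySem.List.pyGetD (pvMat nn g) (i : Int) []) (j : Int) 0 = g i j := by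
  unfold pvMat
  simp only [PySem.List.pyGetD_natCast]
  rw [PySem.List.getD_map_range _ _ _ _ hi, PySem.List.getD_map_range _ _ _ _ hj]

theorem pvMat_congr (nn : ℕ) (g h : ℕ → ℕ → Int)
    (H : ∀ i < nn, ∀ j < nn, g i j = h i j) : pvMat nn g = pvMat nn h := by
  unfold pvMat
  apply List.map_congr_left
  intro i hi
  apply List.map_congr_left
  intro j hj
  exact H i (List.mem_range.mp hi) j (List.mem_range.mp hj)

theorem pvSum_add (l : List ℕ) (f g : ℕ → Int) :
    (l.map (fun k => f k + g k)).sum = (l.map f).sum + (l.map g).sum := by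
  induction l with
  | nil => simp
  | cons x t ih => simp [ih]; ring

theorem pvTranspose_mat (n : Int) (g : ℕ → ℕ → Int) :
    pvTranspose (pvMat n.toNat g) n = pvMat n.toNat (fun i j => g j i) := by
  unfold pvTranspose
  rw [pvRange_cast]
  simp only [List.map_map]
  unfold pvMat
  apply List.map_congr_left
  intro i hi
  simp only [Function.comp]
  apply List.map_congr_left
  intro j hj
  exact pvMat_getD n.toNat g j i (List.mem_range.mp hj) (List.mem_range.mp hi)

-- fuel-irrelevance for pvMgo
theorem pvMgo_congr (c : ℕ → ℕ → Bool) :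
    ∀ f1 f2 i j, i ≤ f1 → i ≤ f2 → pvMgo c f1 i j = pvMgo c f2 i j := by
  intro f1
  induction f1 with
  | zero =>
      intro f2 i j h1 h2
      interval_cases i
      cases f2 with
      | zero => rfl
      | succ g => simp [pvMgo]
  | succ g1 ih =>
      intro f2 i j h1 h2
      cases f2 with
      | zero =>
          interval_cases i
          simp [pvMgo]
      | succ g2 =>
          simp only [pvMgo]
          by_cases hij : i ≤ j
          · simp [hij]
          · simp only [hij, if_false]
            congr 1
            apply congrArg
            apply List.map_congr_left
            intro k hk
            have hk' := List.mem_range.mp hk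
            by_cases hc : c k i
            · simp only [hc, if_true]
              exact ih g2 k j (by omega) (by omega)
            · simp [hc]

theorem pvM_le (c : ℕ → ℕ → Bool) (i j : ℕ) (h : i ≤ j) : pvM c i j = pvDelta i j := by
  unfold pvM
  cases i with
  | zero => rfl
  | succ s => simp [pvMgo, h]

theorem pvM_rec (c : ℕ → ℕ → Bool) (i j : ℕ) (h : j < i) :
    pvM c i j = -(((List.range i).map (fun k => if c k i then pvM c k j else 0)).sum) := by
  unfold pvM
  cases i with
  | zero => omega
  | succ s =>
      simp only [pvMgo, show ¬ (s + 1 ≤ j) from by omega, if_false]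
      congr 1
      apply congrArg
      apply List.map_congr_left
      intro k hk
      have hk' := List.mem_range.mp hk
      by_cases hc : c k (s + 1)
      · simp only [hc, if_true]
        exact pvMgo_congr c s k k j (by omega) (le_refl k)
      · simp [hc]

-- (-N)^m vanishes below the m-th superdiagonal
theorem pvT_vanish (c : ℕ → ℕ → Bool) (nn : ℕ) :
    ∀ m a b, b < a + m → pvT c nn m a b = 0 := by
  intro m
  induction m with
  | zero =>
      intro a b h
      simp [pvT, pvDelta, show a ≠ b from by omega]
  | succ m ih =>
      intro a b h
      simp only [pvT]
      have hz : ∀ k ∈ List.range nn, pvT c nn m a k * pvN c k b = 0 := by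
        intro k _
        by_cases hk : k < b
        · rw [ih a k (by omega)]; ring
        · simp [pvN, hk]
      rw [List.map_congr_left hz]
      simp

theorem pvS_succ (c : ℕ → ℕ → Bool) (nn t a b : ℕ) :
    pvS c nn (t + 1) a b = pvS c nn t a b + pvT c nn (t + 1) a b := by
  unfold pvS
  rw [List.range_succ, List.map_append, List.sum_append]
  simp

theorem pvS_le (c : ℕ → ℕ → Bool) (nn : ℕ) (t a b : ℕ) (h : b ≤ a) :
    pvS c nn t a b = pvDelta a b := by
  induction t with
  | zero => simp [pvS, pvT]
  | succ t ih =>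
      rw [pvS_succ, ih, pvT_vanish c nn (t + 1) a b (by omega)]
      ring

-- the Neumann partial sums satisfy the substitution recurrence
theorem pvS_rec (c : ℕ → ℕ → Bool) (nn t a b : ℕ) :
    pvS c nn (t + 1) a b =
      pvDelta a b - ((List.range nn).map (fun k => pvS c nn t a k * pvN c k b)).sum := by
  induction t with
  | zero =>
      rw [pvS_succ]
      have h0 : pvS c nn 0 a b = pvDelta a b := by simp [pvS, pvT]
      rw [h0]
      simp only [pvT]
      have : ∀ k ∈ List.range nn, pvDelta a k * pvN c k b = pvS c nn 0 a k * pvN c k b := by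
        intro k _; simp [pvS, pvT]
      rw [List.map_congr_left this]
      ring
  | succ t ih =>
      rw [pvS_succ, ih]
      have hT : pvT c nn (t + 2) a b
          = -(((List.range nn).map (fun k => pvT c nn (t + 1) a k * pvN c k b)).sum) := rfl
      rw [hT]
      have hsplit : ((List.range nn).map (fun k => pvS c nn (t + 1) a k * pvN c k b)).sum
          = ((List.range nn).map (fun k => pvS c nn t a k * pvN c k b)).sum
            + ((List.range nn).map (fun k => pvT c nn (t + 1) a k * pvN c k b)).sum := by
        rw [← pvSum_add]
        apply congrArg
        apply List.map_congr_left
        intro k _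
        rw [pvS_succ]
        ring
      rw [hsplit]
      ring

theorem pvSum_range_drop (f : ℕ → Int) (i nn : ℕ) (h : i ≤ nn)
    (hz : ∀ k, i ≤ k → f k = 0) :
    ((List.range nn).map f).sum = ((List.range i).map f).sum := by
  obtain ⟨d, rfl⟩ : ∃ d, nn = i + d := ⟨nn - i, by omega⟩
  rw [List.range_add, List.map_append, List.sum_append]
  have hz' : ∀ k ∈ (List.range d).map (fun x => i + x), f k = 0 := by
    intro k hk
    rcases List.mem_map.mp hk with ⟨x, _, rfl⟩
    exact hz (i + x) (by omega)
  rw [List.map_congr_left hz']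
  have h0 : (List.map ((fun _ => (0 : Int)) ∘ fun x => i + x) (List.range d)).sum = 0 := by
    apply List.sum_eq_zero
    intro x hx
    rcases List.mem_map.mp hx with ⟨y, _, rfl⟩
    rfl
  rw [← List.map_map] at h0
  rw [h0]
  ring

-- main algebraic bridge: forward substitution = Neumann sum (transposed)
theorem pvM_eq_pvS (c : ℕ → ℕ → Bool) (nn : ℕ) :
    ∀ t i j, i ≤ nn → i ≤ j + t → pvM c i j = pvS c nn t j i := by
  intro t
  induction t with
  | zero =>
      intro i j _ hij
      rw [pvM_le c i j (by omega), pvS_le c nn 0 j i (by omega)]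
      unfold pvDelta
      by_cases h : i = j <;> simp [h, Ne.symm]
  | succ t ih =>
      intro i j hnn hij
      by_cases hle : i ≤ j
      · rw [pvM_le c i j hle, pvS_le c nn (t + 1) j i hle]
        unfold pvDelta
        by_cases h : i = j <;> simp [h, Ne.symm]
      · have hj : j < i := by omega
        rw [pvM_rec c i j hj, pvS_rec]
        have h1 : ∀ k ∈ List.range i,
            (if c k i then pvM c k j else 0) = pvS c nn t j k * pvN c k i := by
          intro k hk
          have hk' := List.mem_range.mp hk
          by_cases hc : c k i
          · simp only [hc, if_true, pvN, hk', if_true]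
            by_cases hkj : j ≤ k
            · rw [ih k j (by omega) (by omega)]; ring
            · rw [pvM_le c k j (by omega), pvS_le c nn t j k (by omega)]
              unfold pvDelta
              have : k ≠ j := by omega
              simp [this, Ne.symm this]
          · simp [pvN, hc]
        rw [List.map_congr_left h1]
        have h2 : ((List.range nn).map (fun k => pvS c nn t j k * pvN c k i)).sum
            = ((List.range i).map (fun k => pvS c nn t j k * pvN c k i)).sum := by
          apply pvSum_range_drop _ _ _ hnn
          intro k hk
          simp [pvN, show ¬ (k < i) from by omega]
        rw [h2]
        have hd : pvDelta j i = 0 := by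
          unfold pvDelta; simp [show j ≠ i from by omega]
        rw [hd]
        ring

-- ---- port-B characterization ----

theorem pvBN_eq (zeta : List (List Int)) (n : Int) :
    pvBN zeta n = pvMat n.toNat (pvN (pvC zeta)) := by
  unfold pvBN pvMat
  rw [pvRange_cast, List.map_map]
  apply List.map_congr_left
  intro k _
  simp only [Function.comp]
  rw [List.map_map]
  apply List.map_congr_left
  intro b _
  simp only [Function.comp, PySem.List.pyGetD_natCast]
  by_cases h : k < b
  · simp [pvN, pvC, h]
  · simp [pvN, h]

theorem pvBId_eq (n : Int) : pvBId n = pvMat n.toNat pvDelta := by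
  unfold pvBId pvMat
  rw [pvRange_cast, List.map_map]
  apply List.map_congr_left
  intro a _
  simp only [Function.comp]
  rw [List.map_map]
  apply List.map_congr_left
  intro b _
  simp only [Function.comp, pvDelta]
  by_cases h : a = b
  · simp [h]
  · simp [h]

theorem pvFoldl_const {α β : Type} (f : α → α) (l : List β) (x : α) :
    l.foldl (fun s _ => f s) x = f^[l.length] x := by
  induction l generalizing x with
  | nil => rfl
  | cons b t ih => simp [List.foldl_cons, ih, Function.iterate_succ_apply]

theorem pvBStep_term (zeta : List (List Int)) (n : Int) (t : ℕ) :
    ((PySem.List.pyRange 0 n 1).map (fun a =>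
      (PySem.List.pyRange 0 n 1).map (fun b =>
        -(((PySem.List.pyRange 0 n 1).map (fun k =>
            PySem.List.pyGetD (PySem.List.pyGetD (pvMat n.toNat (pvT (pvC zeta) n.toNat t)) a []) k 0 *
            PySem.List.pyGetD (PySem.List.pyGetD (pvMat n.toNat (pvN (pvC zeta))) k []) b 0)).sum))))
      = pvMat n.toNat (pvT (pvC zeta) n.toNat (t + 1)) := by
  conv_rhs => rw [pvMat]
  rw [pvRange_cast, List.map_map]
  apply List.map_congr_left
  intro a ha
  simp only [Function.comp_def, List.map_map]
  apply List.map_congr_left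
  intro b hb
  have hent : ∀ k ∈ List.range n.toNat,
      PySem.List.pyGetD (PySem.List.pyGetD (pvMat n.toNat (pvT (pvC zeta) n.toNat t)) ((a : ℕ) : Int) []) ((k : ℕ) : Int) 0 *
      PySem.List.pyGetD (PySem.List.pyGetD (pvMat n.toNat (pvN (pvC zeta))) ((k : ℕ) : Int) []) ((b : ℕ) : Int) 0
        = pvT (pvC zeta) n.toNat t a k * pvN (pvC zeta) k b := by
    intro k hk
    rw [pvMat_getD _ _ _ _ (List.mem_range.mp ha) (List.mem_range.mp hk),
        pvMat_getD _ _ _ _ (List.mem_range.mp hk) (List.mem_range.mp hb)]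
  rw [List.map_congr_left hent]
  rfl

theorem pvBStep_res (zeta : List (List Int)) (n : Int) (t : ℕ) :
    ((PySem.List.pyRange 0 n 1).map (fun a =>
      (PySem.List.pyRange 0 n 1).map (fun b =>
        PySem.List.pyGetD (PySem.List.pyGetD (pvMat n.toNat (pvS (pvC zeta) n.toNat t)) a []) b 0 +
        PySem.List.pyGetD (PySem.List.pyGetD (pvMat n.toNat (pvT (pvC zeta) n.toNat (t + 1))) a []) b 0)))
      = pvMat n.toNat (pvS (pvC zeta) n.toNat (t + 1)) := by
  conv_rhs => rw [pvMat]
  rw [pvRange_cast, List.map_map]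
  apply List.map_congr_left
  intro a ha
  simp only [Function.comp]
  rw [List.map_map]
  apply List.map_congr_left
  intro b hb
  simp only [Function.comp]
  rw [pvMat_getD _ _ _ _ (List.mem_range.mp ha) (List.mem_range.mp hb),
      pvMat_getD _ _ _ _ (List.mem_range.mp ha) (List.mem_range.mp hb)]
  exact (pvS_succ (pvC zeta) n.toNat t a b).symm

theorem pvBStep_eq (zeta : List (List Int)) (n : Int) (t : ℕ) :
    pvBStep (pvMat n.toNat (pvN (pvC zeta))) n
      (pvMat n.toNat (pvS (pvC zeta) n.toNat t), pvMat n.toNat (pvT (pvC zeta) n.toNat t))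
    = (pvMat n.toNat (pvS (pvC zeta) n.toNat (t + 1)),
       pvMat n.toNat (pvT (pvC zeta) n.toNat (t + 1))) := by
  unfold pvBStep
  simp only [pvBStep_term zeta n t, pvBStep_res zeta n t]

theorem pvB_iter (zeta : List (List Int)) (n : Int) :
    ∀ m, (fun st => pvBStep (pvMat n.toNat (pvN (pvC zeta))) n st)^[m]
        (pvMat n.toNat pvDelta, pvMat n.toNat pvDelta)
      = (pvMat n.toNat (pvS (pvC zeta) n.toNat m), pvMat n.toNat (pvT (pvC zeta) n.toNat m)) := by
  intro m
  induction m with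
  | zero =>
      simp only [Function.iterate_zero, id_eq]
      have h1 : pvMat n.toNat (pvS (pvC zeta) n.toNat 0) = pvMat n.toNat pvDelta := by
        apply pvMat_congr; intro a _ b _; simp [pvS, pvT]
      have h2 : pvMat n.toNat (pvT (pvC zeta) n.toNat 0) = pvMat n.toNat pvDelta := by
        apply pvMat_congr; intro a _ b _; simp [pvT]
      rw [h1, h2]
  | succ m ih =>
      rw [Function.iterate_succ_apply', ih]
      exact pvBStep_eq zeta n m

-- ---- port-A characterization ----

theorem pvMat_row (nn : ℕ) (g : ℕ → ℕ → Int) (i : ℕ) (hi : i < nn) :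
    PySem.List.pyGetD (pvMat nn g) ((i : ℕ) : Int) [] = (List.range nn).map (g i) := by
  unfold pvMat
  rw [PySem.List.pyGetD_natCast, PySem.List.getD_map_range _ _ _ _ hi]

theorem pvMat_set (nn : ℕ) (g : ℕ → ℕ → Int) (i j : ℕ) (hi : i < nn) (hj : j < nn) (v : Int) :
    PySem.List.pySetD (pvMat nn g) ((i : ℕ) : Int)
      (PySem.List.pySetD (PySem.List.pyGetD (pvMat nn g) ((i : ℕ) : Int) []) ((j : ℕ) : Int) v)
    = pvMat nn (fun r s => if r = i ∧ s = j then v else g r s) := by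
  rw [pvMat_row nn g i hi, PySem.List.pySetD_natCast, PySem.List.pySetD_natCast]
  unfold pvMat
  rw [pvSet_map_range _ _ _ hj, pvSet_map_range _ _ _ hi]
  apply List.map_congr_left
  intro r _
  by_cases hri : r = i
  · subst hri
    rw [if_pos rfl]
    apply List.map_congr_left
    intro s _
    by_cases hsj : s = j
    · subst hsj; simp
    · simp [hsj]
  · simp only [if_neg hri]
    apply List.map_congr_left
    intro s _
    simp [hri]

theorem pvTransp_getD (zeta : List (List Int)) (n : Int) (i k : ℕ)
    (hi : i < n.toNat) (hk : k < n.toNat) :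
    PySem.List.pyGetD (PySem.List.pyGetD (pvTranspose zeta n) ((i : ℕ) : Int) []) ((k : ℕ) : Int) 0
      = (zeta.getD k []).getD i 0 := by
  unfold pvTranspose
  rw [pvRange_cast, List.map_map, PySem.List.pyGetD_natCast, PySem.List.pyGetD_natCast,
      PySem.List.getD_map_range _ _ _ _ hi]
  simp only [Function.comp_def, List.map_map]
  rw [PySem.List.getD_map_range _ _ _ _ hk]
  simp [PySem.List.pyGetD_natCast]

-- loop-invariant generators for A's triple loop
def pvH (c : ℕ → ℕ → Bool) (t s : ℕ) (v : Int) (i j : ℕ) : Int :=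
  if i < t then pvM c i j else if i = t ∧ j < s then pvM c t j
  else if i = t ∧ j = s then v else pvDelta i j

def pvPart (c : ℕ → ℕ → Bool) (t s r : ℕ) : Int :=
  ((List.range r).map (fun k => if c k t then pvM c k s else 0)).sum

def pvG (c : ℕ → ℕ → Bool) (t s i j : ℕ) : Int :=
  if i < t then pvM c i j else if i = t ∧ j < s then pvM c t j else pvDelta i j

def pvF (c : ℕ → ℕ → Bool) (t i j : ℕ) : Int :=
  if i < t then pvM c i j else pvDelta i j

theorem pvH_at (c : ℕ → ℕ → Bool) (t s : ℕ) (v : Int) : pvH c t s v t s = v := by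
  unfold pvH
  simp

theorem pvH_lt (c : ℕ → ℕ → Bool) (t s : ℕ) (v : Int) (k j : ℕ) (hk : k < t) :
    pvH c t s v k j = pvM c k j := by
  unfold pvH
  simp [hk]

theorem pvAInner_step (zeta : List (List Int)) (n : Int) (t s k : ℕ)
    (ht : t < n.toNat) (hs : s < t) (hk : k < t) (v : Int) :
    pvAInner (pvTranspose zeta n) ((t : ℕ) : Int) ((s : ℕ) : Int)
        (pvMat n.toNat (pvH (pvC zeta) t s v)) ((k : ℕ) : Int)
    = pvMat n.toNat (pvH (pvC zeta) t s
        (v - (if pvC zeta k t then pvM (pvC zeta) k s else 0))) := by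
  unfold pvAInner
  rw [pvMat_getD _ _ _ _ ht (lt_trans hs ht),
      pvTransp_getD zeta n t k ht (lt_trans hk ht),
      pvMat_getD _ _ _ _ (lt_trans hk ht) (lt_trans hs ht),
      pvMat_set _ _ _ _ ht (lt_trans hs ht),
      pvH_at, pvH_lt _ _ _ _ _ _ hk]
  apply pvMat_congr
  intro r _ q _
  by_cases h1 : r = t ∧ q = s
  · rcases h1 with ⟨rfl, rfl⟩
    rw [if_pos ⟨rfl, rfl⟩, pvH_at]
    rfl
  · rw [if_neg h1]
    unfold pvH
    by_cases h2 : r < t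
    · simp [h2]
    · by_cases h3 : r = t ∧ q < s
      · simp [h3]
      · simp [h3, h1]

theorem pvAInner_fold (zeta : List (List Int)) (n : Int) (t s : ℕ)
    (ht : t < n.toNat) (hs : s < t) :
    ∀ r, r ≤ t →
      (List.range r).foldl
        (fun out k => pvAInner (pvTranspose zeta n) ((t : ℕ) : Int) ((s : ℕ) : Int) out ((k : ℕ) : Int))
        (pvMat n.toNat (pvH (pvC zeta) t s 0))
      = pvMat n.toNat (pvH (pvC zeta) t s (-(pvPart (pvC zeta) t s r))) := by
  intro r
  induction r with
  | zero =>
      intro _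
      simp [pvPart]
  | succ r ih =>
      intro hr
      simp only [List.range_succ, List.foldl_append, List.foldl_cons, List.foldl_nil]
      rw [ih (by omega), pvAInner_step zeta n t s r ht hs (by omega)]
      have hv : -(pvPart (pvC zeta) t s r) - (if pvC zeta r t then pvM (pvC zeta) r s else 0)
          = -(pvPart (pvC zeta) t s (r + 1)) := by
        unfold pvPart
        rw [List.range_succ, List.map_append, List.sum_append]
        simp
        ring
      rw [hv]

theorem pvAMiddle_step (zeta : List (List Int)) (n : Int) (t s : ℕ)
    (ht : t < n.toNat) (hs : s < t) :
    pvAMiddle (pvTranspose zeta n) ((t : ℕ) : Int)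
        (pvMat n.toNat (pvG (pvC zeta) t s)) ((s : ℕ) : Int)
    = pvMat n.toNat (pvG (pvC zeta) t (s + 1)) := by
  unfold pvAMiddle
  rw [pvRange_cast, List.foldl_map]
  simp only [Int.toNat_natCast]
  have hbase : pvMat n.toNat (pvG (pvC zeta) t s) = pvMat n.toNat (pvH (pvC zeta) t s 0) := by
    apply pvMat_congr
    intro r _ q _
    unfold pvG pvH
    by_cases h2 : r < t
    · rw [if_pos h2, if_pos h2]
    · rw [if_neg h2, if_neg h2]
      by_cases h3 : r = t ∧ q < s
      · rw [if_pos h3, if_pos h3]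
      · rw [if_neg h3, if_neg h3]
        by_cases h4 : r = t ∧ q = s
        · rw [if_pos h4]
          rcases h4 with ⟨rfl, rfl⟩
          simp [pvDelta, show r ≠ q from by omega]
        · rw [if_neg h4]
  rw [hbase, pvAInner_fold zeta n t s ht hs t (le_refl t)]
  have hval : -(pvPart (pvC zeta) t s t) = pvM (pvC zeta) t s := by
    rw [pvM_rec (pvC zeta) t s hs]
    rfl
  rw [hval]
  apply pvMat_congr
  intro r _ q _
  unfold pvH pvG
  by_cases h2 : r < t
  · rw [if_pos h2, if_pos h2]
  · rw [if_neg h2, if_neg h2]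
    by_cases h3 : r = t ∧ q < s
    · rw [if_pos h3, if_pos (show r = t ∧ q < s + 1 from ⟨h3.1, by omega⟩)]
    · by_cases h4 : r = t ∧ q = s
      · rw [if_neg h3, if_pos h4, if_pos (show r = t ∧ q < s + 1 from ⟨h4.1, by omega⟩)]
        rcases h4 with ⟨rfl, rfl⟩
        rfl
      · have h5 : ¬ (r = t ∧ q < s + 1) := by
          intro hc
          have h3' : ¬ q < s := fun hqs => h3 ⟨hc.1, hqs⟩
          exact h4 ⟨hc.1, by omega⟩
        rw [if_neg h3, if_neg h4, if_neg h5]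

theorem pvAOuter_step (zeta : List (List Int)) (n : Int) (t : ℕ) (ht : t < n.toNat) :
    pvAOuter (pvTranspose zeta n) (pvMat n.toNat (pvF (pvC zeta) t)) ((t : ℕ) : Int)
    = pvMat n.toNat (pvF (pvC zeta) (t + 1)) := by
  unfold pvAOuter
  rw [pvRange_cast, List.foldl_map]
  simp only [Int.toNat_natCast]
  have hinv : ∀ s, s ≤ t →
      (List.range s).foldl
        (fun out j => pvAMiddle (pvTranspose zeta n) ((t : ℕ) : Int) out ((j : ℕ) : Int))
        (pvMat n.toNat (pvG (pvC zeta) t 0))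
      = pvMat n.toNat (pvG (pvC zeta) t s) := by
    intro s
    induction s with
    | zero => intro _; rfl
    | succ s ih =>
        intro hs
        simp only [List.range_succ, List.foldl_append, List.foldl_cons, List.foldl_nil]
        rw [ih (by omega), pvAMiddle_step zeta n t s ht (by omega)]
  have hbase : pvMat n.toNat (pvF (pvC zeta) t) = pvMat n.toNat (pvG (pvC zeta) t 0) := by
    apply pvMat_congr
    intro r _ q _
    unfold pvF pvG
    by_cases h2 : r < t
    · rw [if_pos h2, if_pos h2]
    · rw [if_neg h2, if_neg h2, if_neg (show ¬ (r = t ∧ q < 0) from fun hc => by omega)]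
  rw [hbase, hinv t (le_refl t)]
  apply pvMat_congr
  intro r _ q _
  unfold pvG pvF
  by_cases h2 : r < t
  · rw [if_pos h2, if_pos (show r < t + 1 from by omega)]
  · rw [if_neg h2]
    by_cases h3 : r = t ∧ q < t
    · rw [if_pos h3, if_pos (show r < t + 1 from by omega)]
      rcases h3 with ⟨rfl, _⟩
      rfl
    · rw [if_neg h3]
      by_cases h4 : r = t
      · subst h4
        rw [if_pos (show r < r + 1 from by omega)]
        have hq : r ≤ q := by
          have h3' : ¬ q < r := fun hc => h3 ⟨rfl, hc⟩
          omega
        exact (pvM_le (pvC zeta) r q hq).symm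
      · rw [if_neg (show ¬ r < t + 1 from by omega)]

theorem pvADiag_step (n : Int) (t : ℕ) (ht : t < n.toNat) (g : ℕ → ℕ → Int) :
    pvADiag (pvMat n.toNat g) ((t : ℕ) : Int)
      = pvMat n.toNat (fun r s => if r = t ∧ s = t then 1 else g r s) := by
  unfold pvADiag
  exact pvMat_set n.toNat g t t ht ht 1

theorem pvA_out0 (n : Int) :
    (PySem.List.pyRange 0 n 1).map (fun _ => List.replicate n.toNat (0 : Int))
      = pvMat n.toNat (fun _ _ => 0) := by
  unfold pvMat
  rw [pvRange_cast, List.map_map]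
  apply List.map_congr_left
  intro i _
  simp only [Function.comp_def]
  rw [List.map_const', List.length_range]

theorem pvA_diag_fold (n : Int) :
    (PySem.List.pyRange 0 n 1).foldl pvADiag (pvMat n.toNat (fun _ _ => 0))
      = pvMat n.toNat pvDelta := by
  rw [pvRange_cast, List.foldl_map]
  have hinv : ∀ t, t ≤ n.toNat →
      (List.range t).foldl (fun out k => pvADiag out ((k : ℕ) : Int)) (pvMat n.toNat (fun _ _ => 0))
      = pvMat n.toNat (fun i j => if i = j ∧ i < t then 1 else 0) := by
    intro t
    induction t with
    | zero =>
        intro _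
        apply pvMat_congr
        intro r _ q _
        simp
    | succ t ih =>
        intro ht
        simp only [List.range_succ, List.foldl_append, List.foldl_cons, List.foldl_nil]
        rw [ih (by omega), pvADiag_step n t (by omega)]
        apply pvMat_congr
        intro r _ q _
        by_cases h1 : r = t ∧ q = t
        · rcases h1 with ⟨rfl, rfl⟩
          simp
        · rw [if_neg h1]
          by_cases h2 : r = q ∧ r < t
          · rcases h2 with ⟨rfl, h2⟩
            simp [h2, show r < t + 1 from by omega]
          · have h3 : ¬ (r = q ∧ r < t + 1) := by
              intro hc
              rcases hc with ⟨rfl, hc⟩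
              rcases Decidable.em (r < t) with h | h
              · exact h2 ⟨rfl, h⟩
              · exact h1 ⟨by omega, by omega⟩
            rw [if_neg h2, if_neg h3]
  rw [hinv n.toNat (le_refl _)]
  apply pvMat_congr
  intro r hr q _
  unfold pvDelta
  by_cases h : r = q
  · subst h; simp [hr]
  · simp [h]

theorem pvA_outer_fold (zeta : List (List Int)) (n : Int) :
    (PySem.List.pyRange 0 n 1).foldl (pvAOuter (pvTranspose zeta n)) (pvMat n.toNat pvDelta)
      = pvMat n.toNat (fun i j => pvM (pvC zeta) i j) := by
  rw [pvRange_cast, List.foldl_map]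
  have hinv : ∀ t, t ≤ n.toNat →
      (List.range t).foldl (fun out i => pvAOuter (pvTranspose zeta n) out ((i : ℕ) : Int))
        (pvMat n.toNat pvDelta)
      = pvMat n.toNat (pvF (pvC zeta) t) := by
    intro t
    induction t with
    | zero =>
        intro _
        apply pvMat_congr
        intro r _ q _
        simp [pvF]
    | succ t ih =>
        intro ht
        simp only [List.range_succ, List.foldl_append, List.foldl_cons, List.foldl_nil]
        rw [ih (by omega), pvAOuter_step zeta n t (by omega)]
  rw [hinv n.toNat (le_refl _)]
  apply pvMat_congr
  intro r hr q _
  simp [pvF, hr]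

-- characterization of port A
theorem pvA_eq (zeta : List (List Int)) (n : Int) :
    compute_mobius_cubic zeta n = pvMat n.toNat (fun i j => pvM (pvC zeta) j i) := by
  have h : compute_mobius_cubic zeta n
      = pvTranspose
          ((PySem.List.pyRange 0 n 1).foldl (pvAOuter (pvTranspose zeta n))
            ((PySem.List.pyRange 0 n 1).foldl pvADiag
              ((PySem.List.pyRange 0 n 1).map (fun _ => List.replicate n.toNat (0 : Int))))) n := rfl
  rw [h, pvA_out0, pvA_diag_fold, pvA_outer_fold, pvTranspose_mat]

-- characterization of port B
theorem pvB_eq (zeta : List (List Int)) (n : Int) :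
    compute_mobius_cubic_alt zeta n =
      pvMat n.toNat (fun a b => pvS (pvC zeta) n.toNat (n - 1).toNat a b) := by
  have h : compute_mobius_cubic_alt zeta n =
      ((PySem.List.pyRange 0 (n - 1) 1).foldl
        (fun st _ => pvBStep (pvBN zeta n) n st)
        (pvBId n, (pvBId n).map (fun row => row))).1 := rfl
  rw [h]
  have hid : (pvBId n).map (fun row => row) = pvBId n := List.map_id' _
  rw [hid, pvBN_eq, pvBId_eq, pvFoldl_const, PySem.List.length_pyRange_one,
      show n - 1 - 0 = n - 1 from by ring, pvB_iter]

-- ===== VERDICT (by name: the statement is the Claim_ definition above) =====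
theorem compute_mobius_cubic_spec : Claim_equal_compute_mobius_cubic := by
  intro zeta n _ _
  unfold Spec_compute_mobius_cubic
  rw [pvA_eq, pvB_eq]
  apply pvMat_congr
  intro a ha b hb
  apply pvM_eq_pvS
  · omega
  · omega
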